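-- pv_equiv track=rewrite | github.com/shreyakumari0301/Sim | clinical_sim/csv_bundle.py | _drugbank_match_tokens
-- ===== SOURCE A (Python) =====
-- def _norm(s: str) -> str:
--     return str(s).strip().casefold()
--
-- _DRUGBANK_EQUIVALENTS: dict[str, frozenset[str]] = {
--     "aspirin": frozenset({"acetylsalicylic acid", "asa"}),
-- }
--
-- def _drugbank_match_tokens(drug: str) -> set[str]:
--     """Normalized names/tokens that should match the same row as ``drug``."""
--     d = _norm(drug)
--     s: set[str] = {d}
--     for k, syns in _DRUGBANK_EQUIVALENTS.items():
--         if d == k or d in syns: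
--             s.add(k)
--             s |= syns
--     return s
-- ===== SOURCE B (Python) =====
-- def _norm(s: str) -> str:
--     return str(s).strip().casefold()
--
-- _DRUGBANK_EQUIVALENTS: dict[str, frozenset[str]] = {
--     "aspirin": frozenset({"acetylsalicylic acid", "asa"}),
-- }
--
-- # Precomputed reverse index: every token (key or synonym) -> its full equivalence group.
-- _DRUGBANK_INDEX: dict[str, frozenset[str]] = {}
-- for _k, _syns in _DRUGBANK_EQUIVALENTS.items():
--     _group = frozenset({_k}) | _syns
--     for _t in _group:
--         _DRUGBANK_INDEX[_t] = _group
--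
-- def _drugbank_match_tokens(drug: str) -> set[str]:
--     """Normalized names/tokens that should match the same row as ``drug``."""
--     d = _norm(drug)
--     return {d} | _DRUGBANK_INDEX.get(d, frozenset())
-- ===== Notes on version B (the rewrite author's own statement) =====
-- stated objective: idiomatic
-- what changed: Replaced the per-call scan over all equivalence entries (with a membership branch and incremental set mutation) by a module-level reverse index built once, so the call reduces to one dictionary lookup unioned with {d}.
import Mathlib
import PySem

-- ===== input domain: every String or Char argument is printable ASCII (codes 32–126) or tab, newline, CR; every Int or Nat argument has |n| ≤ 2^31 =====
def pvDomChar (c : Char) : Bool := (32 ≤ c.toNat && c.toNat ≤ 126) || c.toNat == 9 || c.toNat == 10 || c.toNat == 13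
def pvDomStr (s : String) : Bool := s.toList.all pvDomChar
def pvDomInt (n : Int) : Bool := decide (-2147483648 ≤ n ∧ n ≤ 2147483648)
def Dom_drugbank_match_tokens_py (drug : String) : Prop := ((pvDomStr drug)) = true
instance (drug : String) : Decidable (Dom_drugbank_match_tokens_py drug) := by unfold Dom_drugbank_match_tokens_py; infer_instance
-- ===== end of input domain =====

-- B replaces A's per-call scan over the equivalence table by a precomputed reverse index with a single lookup (idiomatic).


-- ===== PORT A =====
def pvNorm (s : String) : String := PySem.Str.lower (PySem.Str.strip s)

def pvDrugbankEquivalents : PySem.Dict String (PySem.Set String) :=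
  PySem.Dict.ofList [("aspirin", PySem.Set.ofList ["acetylsalicylic acid", "asa"])]

def drugbank_match_tokens_py (drug : String) : List String :=
  let d := pvNorm drug
  let s : PySem.Set String := PySem.Set.ofList [d]
  (PySem.Dict.items pvDrugbankEquivalents).foldl
    (fun s kv =>
      if d == kv.1 || PySem.Set.contains kv.2 d then
        PySem.Set.union (PySem.Set.add s kv.1) kv.2
      else s) s

-- ===== PORT B =====
-- B: precomputed reverse index token -> full equivalence group; one lookup per call
def pvDrugbankIndex : PySem.Dict String (PySem.Set String) :=
  (PySem.Dict.items pvDrugbankEquivalents).foldl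
    (fun idx kv =>
      let group := PySem.Set.union (PySem.Set.ofList [kv.1]) kv.2
      group.foldl (fun idx t => PySem.Dict.insert idx t group) idx)
    PySem.Dict.empty

def drugbank_match_tokens_py_alt (drug : String) : List String :=
  let d := pvNorm drug
  PySem.Set.union (PySem.Set.ofList [d]) (PySem.Dict.getD pvDrugbankIndex d PySem.Set.empty)

-- ===== PRECONDITION & SPEC =====
def Spec_drugbank_match_tokens_py (drug : String) (out : List String) : Prop := out = drugbank_match_tokens_py_alt drug
instance (drug : String) (out : List String) : Decidable (Spec_drugbank_match_tokens_py drug out) := by unfold Spec_drugbank_match_tokens_py; infer_instance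

-- ===== CLAIM (what is proved, stated in full; the proofs are below) =====
def Claim_equal_drugbank_match_tokens_py : Prop := ∀ (drug : String), Dom_drugbank_match_tokens_py drug → Spec_drugbank_match_tokens_py drug (drugbank_match_tokens_py drug)

-- ===== LEMMAS AND PROOFS =====

-- ===== VERDICT (by name: the statement is the Claim_ definition above) =====
lemma index_eq : pvDrugbankIndex = PySem.Dict.ofList
    [("aspirin", ["aspirin", "acetylsalicylic acid", "asa"]),
     ("acetylsalicylic acid", ["aspirin", "acetylsalicylic acid", "asa"]),
     ("asa", ["aspirin", "acetylsalicylic acid", "asa"])] := by decide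

theorem drugbank_match_tokens_py_spec : Claim_equal_drugbank_match_tokens_py := by
  intro drug _
  unfold Spec_drugbank_match_tokens_py drugbank_match_tokens_py drugbank_match_tokens_py_alt
  generalize pvNorm drug = d
  by_cases h1 : d = "aspirin"
  · subst h1; decide
  · by_cases h2 : d = "acetylsalicylic acid"
    · subst h2; decide
    · by_cases h3 : d = "asa"
      · subst h3; decide
      · have ha : (("aspirin" : String) == d) = false := by simp [Ne.symm h1]
        have hb : (("acetylsalicylic acid" : String) == d) = false := by simp [Ne.symm h2]
        have hc : (("asa" : String) == d) = false := by simp [Ne.symm h3]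
        rw [index_eq]
        simp [ha, hb, hc, pvDrugbankEquivalents, PySem.Dict.ofList, PySem.Dict.update,
              PySem.Dict.insert, PySem.Dict.contains, PySem.Dict.empty, PySem.Set.add,
              PySem.Set.ofList, PySem.Set.contains, PySem.Set.union, PySem.Set.update,
              PySem.Dict.getD, PySem.Dict.get?, PySem.Set.empty, List.find?, h1, h2, h3]
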